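-- pv_equiv track=rewrite | github.com/Yashraj-Muthyapwar/FRAG-MED | src/rag/query_engine.py | _extract_structured_sections
-- ===== SOURCE A (Python) =====
-- def _extract_structured_sections(content: str) -> str:
--     """Extract only === SECTIONS === from parent document"""
--     keep_sections = {
--         "=== PATIENT DEMOGRAPHICS ===",
--         "=== PATIENT-LEVEL DEVICES ===",
--         "=== ENCOUNTER INFORMATION ===",
--         "=== CONDITIONS DOCUMENTED ===",
--         "=== PROCEDURES PERFORMED ===",
--         "=== MEDICATIONS ===",
--         "=== OBSERVATIONS ==="
--     }
--
--     result = []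
--     in_section = False
--     current_lines = []
--
--     for line in content.split('\n'):
--         if any(section in line for section in keep_sections):
--             if current_lines:
--                 result.extend(current_lines)
--             current_lines = [line]
--             in_section = True
--         elif line.strip().startswith("==="):
--             if in_section and current_lines:
--                 result.extend(current_lines)
--             current_lines = []
--             in_section = False
--         elif in_section:
--             current_lines.append(line)
--
--     if current_lines:
--         result.extend(current_lines)
--
--     return '\n'.join(result)
-- ===== SOURCE B (Python) =====
-- def _extract_structured_sections(content: str) -> str:
--     """Extract only === SECTIONS === from parent document"""
--     keep_sections = [
--         "=== PATIENT DEMOGRAPHICS ===",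
--         "=== PATIENT-LEVEL DEVICES ===",
--         "=== ENCOUNTER INFORMATION ===",
--         "=== CONDITIONS DOCUMENTED ===",
--         "=== PROCEDURES PERFORMED ===",
--         "=== MEDICATIONS ===",
--         "=== OBSERVATIONS ==="
--     ]
--
--     def is_keep(line):
--         return any(section in line for section in keep_sections)
--
--     def is_header(line):
--         return is_keep(line) or line.strip().startswith("===")
--
--     # pass 1: cut the document into blocks, one per header line,
--     # dropping any lines that precede the first header
--     blocks = []
--     for line in content.split('\n'):
--         if is_header(line):
--             blocks.append([line])
--         elif blocks:
--             blocks[-1].append(line)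
--
--     # pass 2: keep only blocks headed by a wanted section marker
--     return '\n'.join(ln for b in blocks if is_keep(b[0]) for ln in b)
-- ===== Notes on version B (the rewrite author's own statement) =====
-- stated objective: alternative
-- what changed: Replaces the streaming state machine (in_section flag, running current_lines buffer and interleaved flushes) with a two-pass build-blocks-then-filter structure: one pass cuts the document into header-started blocks, a second pass keeps blocks headed by a wanted marker and joins them.
import Mathlib
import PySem

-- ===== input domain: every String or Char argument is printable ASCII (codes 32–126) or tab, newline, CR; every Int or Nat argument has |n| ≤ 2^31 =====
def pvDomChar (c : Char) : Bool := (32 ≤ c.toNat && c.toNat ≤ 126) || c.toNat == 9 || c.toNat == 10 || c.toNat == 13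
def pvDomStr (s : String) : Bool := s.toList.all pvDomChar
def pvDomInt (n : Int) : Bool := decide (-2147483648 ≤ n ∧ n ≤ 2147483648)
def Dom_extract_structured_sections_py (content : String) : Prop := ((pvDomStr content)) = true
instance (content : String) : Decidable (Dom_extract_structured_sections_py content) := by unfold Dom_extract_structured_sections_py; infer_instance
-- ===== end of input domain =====

-- B replaces A's streaming state machine (in_section flag + interleaved flushes) by a
-- build-blocks-then-filter two-pass decomposition; same cost, alternative structure.

-- ===== PORT A =====
def pvKeepSections : List String :=
  ["=== PATIENT DEMOGRAPHICS ===",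
   "=== PATIENT-LEVEL DEVICES ===",
   "=== ENCOUNTER INFORMATION ===",
   "=== CONDITIONS DOCUMENTED ===",
   "=== PROCEDURES PERFORMED ===",
   "=== MEDICATIONS ===",
   "=== OBSERVATIONS ==="]

-- A's loop body: state = (result, in_section, current_lines)
def pvStepA (st : List String × Bool × List String) (line : String) :
    List String × Bool × List String :=
  let result := st.1
  let in_section := st.2.1
  let current := st.2.2
  if pvKeepSections.any (fun s => PySem.Str.isIn s line) then
    ((if current ≠ [] then result ++ current else result), true, [line])
  else if PySem.Str.startswith (PySem.Str.strip line) "===" then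
    ((if in_section && current ≠ [] then result ++ current else result), false, [])
  else if in_section then
    (result, in_section, current ++ [line])
  else
    (result, in_section, current)

def extract_structured_sections_py (content : String) : String :=
  -- content.split('\n'): "\n" ≠ "" so split? is always some
  let st := ((PySem.Str.split? content "\n").getD []).foldl pvStepA ([], false, [])
  PySem.Str.join "\n" (if st.2.2 ≠ [] then st.1 ++ st.2.2 else st.1)

-- ===== PORT B =====
def pvIsKeep (line : String) : Bool :=
  pvKeepSections.any (fun s => PySem.Str.isIn s line)

def pvIsHeader (line : String) : Bool :=
  pvIsKeep line || PySem.Str.startswith (PySem.Str.strip line) "==="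

-- B's pass-1 loop body: blocks.append([line]) / blocks[-1].append(line)
def pvStepB (blocks : List (List String)) (line : String) : List (List String) :=
  if pvIsHeader line then blocks ++ [[line]]
  else if blocks ≠ [] then blocks.dropLast ++ [(blocks.getLast?.getD []) ++ [line]]
  else blocks

def extract_structured_sections_py_alt (content : String) : String :=
  let blocks := ((PySem.Str.split? content "\n").getD []).foldl pvStepB []
  -- every block starts as [line], so b[0] is exactly b.headD ""
  PySem.Str.join "\n"
    (blocks.flatMap (fun b => if pvIsKeep (b.headD "") then b else []))

-- ===== PRECONDITION & SPEC =====
def Spec_extract_structured_sections_py (content : String) (out : String) : Prop := out = extract_structured_sections_py_alt content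
instance (content : String) (out : String) : Decidable (Spec_extract_structured_sections_py content out) := by unfold Spec_extract_structured_sections_py; infer_instance

-- ===== CLAIM (what is proved, stated in full; the proofs are below) =====
def Claim_equal_extract_structured_sections_py : Prop := ∀ (content : String), Dom_extract_structured_sections_py content → Spec_extract_structured_sections_py content (extract_structured_sections_py content)

-- ===== LEMMAS AND PROOFS =====

-- the kept lines of a block list (pass 2 of B)
def pvKept (blocks : List (List String)) : List String :=
  blocks.flatMap (fun b => if pvIsKeep (b.headD "") then b else [])

-- whether the last block is a kept ("open") section; for [] this is pvIsKeep "" = false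
def pvOpen (blocks : List (List String)) : Bool :=
  pvIsKeep ((blocks.getLast?.getD []).headD "")

theorem pvKept_append_singleton (bs : List (List String)) (b : List String) :
    pvKept (bs ++ [b]) = pvKept bs ++ (if pvIsKeep (b.headD "") then b else []) := by
  simp [pvKept]

theorem pvOpen_append_singleton (bs : List (List String)) (b : List String) :
    pvOpen (bs ++ [b]) = pvIsKeep (b.headD "") := by
  simp [pvOpen]

theorem pvOpen_nil : pvOpen [] = false := by decide

theorem pv_decomp (bs : List (List String)) (h : bs ≠ []) :
    bs = bs.dropLast ++ [bs.getLast?.getD []] := by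
  rw [List.getLast?_eq_some_getLast h]
  simpa using (List.dropLast_append_getLast h).symm

-- Main invariant: running A's state machine from (res, ins, cur) over `lines`
-- gives the same final line list as pass-2 filtering of B's block list,
-- provided the states correspond.
theorem pv_main (lines : List String) :
    ∀ (res cur : List String) (ins : Bool) (blocks : List (List String)),
      (∀ b ∈ blocks, b ≠ []) →
      pvKept blocks = res ++ cur →
      ins = pvOpen blocks →
      cur = (if pvOpen blocks then blocks.getLast?.getD [] else []) →
      (let st := lines.foldl pvStepA (res, ins, cur)
       (if st.2.2 ≠ [] then st.1 ++ st.2.2 else st.1)) =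
        pvKept (lines.foldl pvStepB blocks) := by
  induction lines with
  | nil =>
      intro res cur ins blocks _ hf _ _
      simp only [List.foldl_nil]
      rw [hf]
      cases cur <;> simp
  | cons line rest ih =>
      intro res cur ins blocks hne hf hins hcur
      simp only [List.foldl_cons]
      by_cases hk : pvIsKeep line = true
      · -- KEEP header: A flushes and opens; B starts a new block
        have hstepA : pvStepA (res, ins, cur) line = (res ++ cur, true, [line]) := by
          simp only [pvStepA, pvIsKeep] at hk ⊢
          rw [if_pos hk]
          cases cur <;> simp
        have hhdr : pvIsHeader line = true := by
          simp only [pvIsHeader, hk, Bool.true_or]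
        have hstepB : pvStepB blocks line = blocks ++ [[line]] := by
          simp only [pvStepB, hhdr, if_true]
        rw [hstepA, hstepB]
        apply ih
        · intro b hb
          rcases List.mem_append.1 hb with h | h
          · exact hne b h
          · simp at h; simp [h]
        · rw [pvKept_append_singleton, hf]; simp [hk]
        · rw [pvOpen_append_singleton]; simp [hk]
        · simp [pvOpen_append_singleton, hk]
      · by_cases hh : PySem.Str.startswith (PySem.Str.strip line) "===" = true
        · -- OTHER header: A flushes and closes; B starts a new (later dropped) block
          have hflush : (if ins && cur ≠ [] then res ++ cur else res) = res ++ cur := by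
            by_cases hc : cur = []
            · subst hc; simp
            · have hop : pvOpen blocks = true := by
                by_contra hop
                simp only [Bool.not_eq_true] at hop
                rw [hop] at hcur; simp at hcur; exact hc hcur
              rw [hins, hop]; simp [hc]
          have hstepA : pvStepA (res, ins, cur) line = (res ++ cur, false, []) := by
            simp only [pvStepA, pvIsKeep] at hk ⊢
            rw [if_neg hk, if_pos hh, hflush]
          have hhdr : pvIsHeader line = true := by
            simp only [pvIsHeader, hh, Bool.or_true]
          have hstepB : pvStepB blocks line = blocks ++ [[line]] := by
            simp only [pvStepB, hhdr, if_true]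
          have hkf : pvIsKeep line = false := by simpa using hk
          rw [hstepA, hstepB]
          apply ih
          · intro b hb
            rcases List.mem_append.1 hb with h | h
            · exact hne b h
            · simp at h; simp [h]
          · rw [pvKept_append_singleton, hf]; simp [hkf]
          · rw [pvOpen_append_singleton]; simp [hkf]
          · simp [pvOpen_append_singleton, hkf]
        · -- content line
          have hstepA : pvStepA (res, ins, cur) line =
              (res, ins, if ins then cur ++ [line] else cur) := by
            simp only [pvStepA, pvIsKeep] at hk ⊢
            rw [if_neg hk, if_neg hh]
            cases ins <;> simp
          have hhdr : pvIsHeader line = false := by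
            simp only [pvIsHeader, Bool.or_eq_false_iff]
            exact ⟨by simpa using hk, by simpa using hh⟩
          rw [hstepA]
          by_cases hop : pvOpen blocks = true
          · -- inside a kept section: both append the line to the open block
            have hbne : blocks ≠ [] := by
              intro h; rw [h, pvOpen_nil] at hop; exact absurd hop (by simp)
            have hlast : blocks.getLast?.getD [] ∈ blocks := by
              rw [List.getLast?_eq_some_getLast hbne]
              simpa using List.getLast_mem hbne
            have hlne : blocks.getLast?.getD [] ≠ [] := hne _ hlast
            have hstepB : pvStepB blocks line =
                blocks.dropLast ++ [(blocks.getLast?.getD []) ++ [line]] := by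
              simp only [pvStepB, hhdr, Bool.false_eq_true, if_false]
              rw [if_pos hbne]
            have hhead : ((blocks.getLast?.getD []) ++ [line]).headD "" =
                (blocks.getLast?.getD []).headD "" := by
              cases h : blocks.getLast?.getD [] with
              | nil => exact absurd h hlne
              | cons a t => simp
            have hkeeplast : pvIsKeep ((blocks.getLast?.getD []).headD "") = true := hop
            rw [hstepB, hins, hop]
            simp only [if_true]
            apply ih
            · intro b hb
              rcases List.mem_append.1 hb with h | h
              · exact hne b (List.dropLast_subset _ h)
              · simp at h; simp [h]
            · rw [pvKept_append_singleton, hhead, if_pos hkeeplast]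
              have hsplit : pvKept blocks = pvKept blocks.dropLast ++ (blocks.getLast?.getD []) := by
                conv_lhs => rw [pv_decomp blocks hbne]
                rw [pvKept_append_singleton, if_pos hkeeplast]
              rw [hcur, hop] at hf
              simp only [if_true] at hf
              rw [hsplit] at hf
              have hres : pvKept blocks.dropLast = res := List.append_cancel_right hf
              rw [hres, hcur, hop]
              simp
            · rw [pvOpen_append_singleton, hhead, hkeeplast]
            · rw [pvOpen_append_singleton, hhead, hkeeplast]
              simp only [if_true]
              rw [hcur, if_pos hop]
              simp
          · -- outside any kept section: A ignores the line; B appends it to a dropped block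
            simp only [Bool.not_eq_true] at hop
            have hcur0 : cur = [] := by rw [hcur, hop]; simp
            rw [hins, hop]
            simp only [Bool.false_eq_true, if_false]
            by_cases hbne : blocks = []
            · have hstepB : pvStepB blocks line = blocks := by
                simp only [pvStepB, hhdr, Bool.false_eq_true, if_false]
                rw [if_neg (by simp [hbne])]
              rw [hstepB]
              exact ih res cur false blocks hne hf hop.symm hcur
            · have hlast : blocks.getLast?.getD [] ∈ blocks := by
                rw [List.getLast?_eq_some_getLast hbne]
                simpa using List.getLast_mem hbne
              have hlne : blocks.getLast?.getD [] ≠ [] := hne _ hlast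
              have hkeeplast : pvIsKeep ((blocks.getLast?.getD []).headD "") = false := hop
              have hkeeplast' : pvIsKeep ((blocks.getLast?.getD []).head?.getD "") = false := by
                rw [← List.headD_eq_head?_getD]; exact hkeeplast
              have hstepB : pvStepB blocks line =
                  blocks.dropLast ++ [(blocks.getLast?.getD []) ++ [line]] := by
                simp only [pvStepB, hhdr, Bool.false_eq_true, if_false]
                rw [if_pos hbne]
              have hhead : ((blocks.getLast?.getD []) ++ [line]).headD "" =
                  (blocks.getLast?.getD []).headD "" := by
                cases h : blocks.getLast?.getD [] with
                | nil => exact absurd h hlne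
                | cons a t => simp
              rw [hstepB]
              apply ih
              · intro b hb
                rcases List.mem_append.1 hb with h | h
                · exact hne b (List.dropLast_subset _ h)
                · simp at h; simp [h]
              · rw [pvKept_append_singleton, hhead, if_neg (by simp [hkeeplast'])]
                have hsplit : pvKept blocks = pvKept blocks.dropLast := by
                  conv_lhs => rw [pv_decomp blocks hbne]
                  rw [pvKept_append_singleton, if_neg (by simp [hkeeplast'])]
                  simp
                rw [← hsplit, hf, hcur0]
                simp
              · rw [pvOpen_append_singleton, hhead]
                simp [hkeeplast, hkeeplast']
              · rw [pvOpen_append_singleton, hhead]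
                simp [hcur0, hkeeplast, hkeeplast']

-- ===== VERDICT (by name: the statement is the Claim_ definition above) =====
theorem extract_structured_sections_py_spec : Claim_equal_extract_structured_sections_py := by
  intro content _
  unfold Spec_extract_structured_sections_py
  unfold extract_structured_sections_py extract_structured_sections_py_alt
  have h := pv_main ((PySem.Str.split? content "\n").getD []) [] [] false []
    (by simp) (by simp [pvKept]) (by rw [pvOpen_nil]) (by rw [pvOpen_nil]; simp)
  simp only [List.append_nil] at h
  exact congrArg (PySem.Str.join "\n") h
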